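-- pv_equiv track=rewrite | github.com/sudama-inc/data-structures-and-algorithms-using-python | dsa_practice/list/9_count_the_number_of_groups_of_non-zero_numbers_separated_by_zeros_in_a_given_list.py | sum_non_zero_groups
-- ===== SOURCE A (Python) =====
-- def sum_non_zero_groups(lst):
--     val = 0
--     for ele in lst:
--         if ele == 0:
--             if val != 0:
--                 yield val
--                 val = 0
--         else:
--             val += ele
-- ===== SOURCE B (Python) =====
-- def sum_non_zero_groups(lst):
--     prev = 0
--     for i, ele in enumerate(lst):
--         if ele == 0:
--             s = sum(lst[prev:i])
--             if s != 0:
--                 yield s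
--             prev = i + 1
-- ===== Notes on version B (the rewrite author's own statement) =====
-- stated objective: alternative
-- what changed: Replaced A's running accumulator (val += ele, reset at zeros) with a segment-start index: at each zero B slices lst[prev:i], sums that segment in a nested pass, and yields it if non-zero.
import Mathlib
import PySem

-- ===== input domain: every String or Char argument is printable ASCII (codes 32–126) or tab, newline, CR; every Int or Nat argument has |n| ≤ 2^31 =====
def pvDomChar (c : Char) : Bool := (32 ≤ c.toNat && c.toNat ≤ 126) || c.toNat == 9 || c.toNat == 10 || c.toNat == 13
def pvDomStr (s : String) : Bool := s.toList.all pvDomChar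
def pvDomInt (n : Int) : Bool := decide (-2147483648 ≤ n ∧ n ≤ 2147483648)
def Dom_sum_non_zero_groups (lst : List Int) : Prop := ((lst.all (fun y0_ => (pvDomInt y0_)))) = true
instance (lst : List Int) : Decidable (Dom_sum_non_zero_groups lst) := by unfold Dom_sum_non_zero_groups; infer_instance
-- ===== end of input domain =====

-- B replaces A's incremental accumulator with a segment-start index and a per-segment
-- slice-and-sum at each zero (different decomposition, same cost class; objective: alternative).

-- ===== PORT A =====
-- A: running accumulator val; on a zero, yield val if non-zero and reset.
def pvAStep (st : Int × List Int) (ele : Int) : Int × List Int :=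
  if ele == 0 then
    (if st.1 != 0 then (0, st.2 ++ [st.1]) else st)
  else (st.1 + ele, st.2)

def sum_non_zero_groups (lst : List Int) : List Int :=
  (lst.foldl pvAStep ((0 : Int), ([] : List Int))).2

-- ===== PORT B =====
-- B: segment start prev; at each zero, sum the slice lst[prev:i] and yield it if non-zero.
def pvBStep (lst : List Int) (st : Int × List Int) (p : Int × Int) : Int × List Int :=
  if p.2 == 0 then
    let s := (PySem.List.slice lst (some st.1) (some p.1)).foldl (· + ·) 0
    (p.1 + 1, if s != 0 then st.2 ++ [s] else st.2)
  else st

def sum_non_zero_groups_alt (lst : List Int) : List Int :=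
  ((PySem.List.enumerate lst 0).foldl (pvBStep lst) ((0 : Int), ([] : List Int))).2

-- ===== PRECONDITION & SPEC =====
def Spec_sum_non_zero_groups (lst : List Int) (out : List Int) : Prop := out = sum_non_zero_groups_alt lst
instance (lst : List Int) (out : List Int) : Decidable (Spec_sum_non_zero_groups lst out) := by unfold Spec_sum_non_zero_groups; infer_instance

-- ===== CLAIM (what is proved, stated in full; the proofs are below) =====
def Claim_equal_sum_non_zero_groups : Prop := ∀ (lst : List Int), Dom_sum_non_zero_groups lst → Spec_sum_non_zero_groups lst (sum_non_zero_groups lst)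

-- ===== LEMMAS AND PROOFS =====

-- Loop invariant: walking the suffix lst.drop i, A's accumulator equals the sum of
-- the current segment lst[prev:i] that B will re-sum at the next zero.
lemma pv_key (rest : List Int) : ∀ (lst : List Int) (i prev : Nat) (v : Int) (out : List Int),
    rest = lst.drop i → prev ≤ i →
    v = ((lst.drop prev).take (i - prev)).foldl (· + ·) 0 →
    (rest.foldl pvAStep (v, out)).2 =
      ((PySem.List.enumerate rest (i : Int)).foldl (pvBStep lst) ((prev : Int), out)).2 := by
  induction rest with
  | nil => intro _ _ _ _ _ _ _ _; simp [PySem.List.enumerate]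
  | cons e rest ih =>
    intro lst i prev v out hdrop hle hv
    have hlen : i < lst.length := by
      by_contra h
      simp [List.drop_eq_nil_of_le (by omega : lst.length ≤ i)] at hdrop
    have hei : lst[i]? = some e := by
      have : (lst.drop i)[0]? = some e := by rw [← hdrop]; rfl
      simpa using this
    have hrest : rest = lst.drop (i + 1) := by
      have := congrArg List.tail hdrop
      simpa [List.tail_drop] using this
    rw [PySem.List.enumerate_cons]
    simp only [List.foldl_cons]
    by_cases he : e = 0
    · -- zero: B sums the slice, which equals v by the invariant
      have hs : (PySem.List.slice lst (some (prev : Int)) (some (i : Int))).foldl (· + ·) 0 = v := by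
        rw [PySem.List.slice_natCast, hv]
      rw [show pvBStep lst ((prev : Int), out) ((i : Int), e)
            = (((i : Int)) + 1, if v != 0 then out ++ [v] else out) by
        simp [pvBStep, he, hs]]
      have hstep : pvAStep (v, out) e = (0, if v != 0 then out ++ [v] else out) := by
        by_cases hv0 : v = 0 <;> simp [pvAStep, he, hv0]
      rw [hstep]
      have := ih lst (i + 1) (i + 1) 0 (if v != 0 then out ++ [v] else out) hrest (le_refl _) (by simp)
      simpa [Int.natCast_add] using this
    · -- non-zero: A adds e; segment extends by one element on the right
      rw [show pvBStep lst ((prev : Int), out) ((i : Int), e) = ((prev : Int), out) by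
        simp [pvBStep, he]]
      have hstep : pvAStep (v, out) e = (v + e, out) := by simp [pvAStep, he]
      rw [hstep]
      have htake : (lst.drop prev).take (i + 1 - prev)
          = (lst.drop prev).take (i - prev) ++ [e] := by
        have h1 : i + 1 - prev = (i - prev) + 1 := by omega
        have h2 : (lst.drop prev)[i - prev]? = some e := by
          rw [List.getElem?_drop]
          rwa [show prev + (i - prev) = i by omega]
        rw [h1, List.take_add_one, h2]
        rfl
      have hv' : v + e = ((lst.drop prev).take (i + 1 - prev)).foldl (· + ·) 0 := by
        rw [htake, List.foldl_append, ← hv]; rfl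
      have := ih lst (i + 1) prev (v + e) out hrest (by omega) hv'
      simpa [Int.natCast_add] using this

-- ===== VERDICT (by name: the statement is the Claim_ definition above) =====
theorem sum_non_zero_groups_spec : Claim_equal_sum_non_zero_groups := by
  intro lst _
  unfold Spec_sum_non_zero_groups sum_non_zero_groups sum_non_zero_groups_alt
  have := pv_key lst lst 0 0 0 [] (by simp) (le_refl _) (by simp)
  simpa using this
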